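-- pv_equiv track=rewrite | github.com/darren-huang/leetcode-grind | hackerrank_comps/goldman_sachs_women_codesprint/2.elevator_travel.py | solve
-- ===== SOURCE A (Python) =====
-- def get_dist(p, index, val):
--     dist = 0
--     if index == 0:
--         dist += val
--     if index > 0:
--         dist += abs(val - p[index - 1])
--     if index < len(p) - 1:
--         dist += abs(val - p[index + 1])
--     return dist
--
-- def solve(p):
--     total_dist = p[0]
--     for i in range(len(p) - 1):
--         total_dist += abs(p[i] - p[i + 1])
--
--     best_so_far = total_dist
--
--     for i in range(len(p) - 1):
--         for j in range(i + 1, len(p)):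
--             curr_pair_dist = get_dist(p, i, p[i]) + get_dist(p, j, p[j])
--             if abs(i - j) == 1:
--                 curr_pair_dist -= abs(p[i] - p[j])
--
--             # swap i and j, then calc diff
--             new_pair_dist = get_dist(p, i, p[j]) + get_dist(p, j, p[i])
--             if abs(i - j) == 1:
--                 new_pair_dist += abs(p[i] - p[j])
--
--             best_so_far = min(best_so_far, total_dist - curr_pair_dist + new_pair_dist)
--     return best_so_far
-- ===== SOURCE B (Python) =====
-- def solve(p):
--     def dist(q):
--         t = q[0]  # first floor
--         for a, b in zip(q, q[1:]):
--             t += abs(a - b)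
--         return t
--
--     best = dist(p)
--     for i in range(len(p) - 1):
--         for j in range(i + 1, len(p)):
--             q = list(p)
--             q[i], q[j] = q[j], q[i]
--             best = min(best, dist(q))
--     return best
-- ===== Notes on version B (the rewrite author's own statement) =====
-- stated objective: simpler
-- what changed: B drops get_dist and all incremental adjacency corrections: it computes a plain distance function d(q) = first floor plus the sum of absolute adjacent differences and, for every pair i<j, recomputes d on a swapped copy of the list, taking the minimum over the no-swap baseline and all pairs.
import Mathlib
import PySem

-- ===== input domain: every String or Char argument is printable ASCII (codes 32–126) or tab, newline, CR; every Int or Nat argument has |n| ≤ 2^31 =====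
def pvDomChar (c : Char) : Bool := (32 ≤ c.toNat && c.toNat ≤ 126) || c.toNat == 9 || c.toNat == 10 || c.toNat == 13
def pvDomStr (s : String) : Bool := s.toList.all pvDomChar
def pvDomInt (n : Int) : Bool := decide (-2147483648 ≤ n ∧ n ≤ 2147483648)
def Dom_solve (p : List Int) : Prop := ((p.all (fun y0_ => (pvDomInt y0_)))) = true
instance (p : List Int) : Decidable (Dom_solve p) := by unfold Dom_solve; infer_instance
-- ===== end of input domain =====

-- B re-implements A's one optimal swap search by recomputing the full travel distance of each
-- swapped copy (simpler, no incremental edge corrections); B is O(n^3) vs A's O(n^2), not faster.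

-- ===== PORT A =====
-- get_dist(p, index, val): sum of val's travel contributions at position `index`
def get_dist (p : List Int) (index : Nat) (val : Int) : Int :=
  (if index = 0 then val else 0)
    + (if 0 < index then |val - p.getD (index - 1) 0| else 0)
    + (if (index : Int) < (p.length : Int) - 1 then |val - p.getD (index + 1) 0| else 0)

def solve (p : List Int) : Int :=
  let total :=
    (List.range (p.length - 1)).foldl
      (fun acc i => acc + |p.getD i 0 - p.getD (i + 1) 0|) (p.getD 0 0)
  (List.range (p.length - 1)).foldl
    (fun best i =>
      (List.range' (i + 1) (p.length - (i + 1))).foldl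
        (fun best j =>
          let curr := get_dist p i (p.getD i 0) + get_dist p j (p.getD j 0)
          let curr := if ((i : Int) - (j : Int)).natAbs = 1 then curr - |p.getD i 0 - p.getD j 0| else curr
          let nw := get_dist p i (p.getD j 0) + get_dist p j (p.getD i 0)
          let nw := if ((i : Int) - (j : Int)).natAbs = 1 then nw + |p.getD i 0 - p.getD j 0| else nw
          min best (total - curr + nw))
        best)
    total

-- ===== PORT B =====
-- dist(q) = q[0] + sum of |a-b| over consecutive pairs (zip of q with its tail)
def bDist (q : List Int) : Int :=
  (q.zip q.tail).foldl (fun t ab => t + |ab.1 - ab.2|) (q.getD 0 0)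

-- q = list(p); q[i], q[j] = q[j], q[i]
def swapB (p : List Int) (i j : Nat) : List Int :=
  (p.set i (p.getD j 0)).set j (p.getD i 0)

def solve_alt (p : List Int) : Int :=
  (List.range (p.length - 1)).foldl
    (fun best i =>
      (List.range' (i + 1) (p.length - (i + 1))).foldl
        (fun best j => min best (bDist (swapB p i j)))
        best)
    (bDist p)

-- ===== PRECONDITION & SPEC =====
-- Pre_ excludes only the empty list, on which Python A raises IndexError reading the first floor.
def Pre_solve (p : List Int) : Prop := p ≠ []
instance (p : List Int) : Decidable (Pre_solve p) := by unfold Pre_solve; infer_instance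
def pvWitness_solve : List Int := [3, 1, 2]

def Spec_solve (p : List Int) (out : Int) : Prop := out = solve_alt p
instance (p : List Int) (out : Int) : Decidable (Spec_solve p out) := by unfold Spec_solve; infer_instance

-- ===== CLAIM (what is proved, stated in full; the proofs are below) =====
def Claim_equal_solve : Prop := ∀ (p : List Int), Dom_solve p → Pre_solve p → Spec_solve p (solve p)

-- ===== LEMMAS AND PROOFS =====

-- sum of |q[k] - q[k+1]| over consecutive positions, structurally
def esum : List Int → Int
  | x :: y :: t => |x - y| + esum (y :: t)
  | _ => 0

theorem esum_nil : esum [] = 0 := rfl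
theorem esum_single (x : Int) : esum [x] = 0 := rfl
theorem esum_cons₂ (x y : Int) (t : List Int) : esum (x :: y :: t) = |x - y| + esum (y :: t) := rfl

-- glue term between two concatenated segments
def glue (u : List Int) (x : Int) : Int :=
  match u.getLast? with
  | some l => |l - x|
  | none => 0

theorem glue_nil (x : Int) : glue [] x = 0 := rfl

theorem zipfold (q : List Int) (s : Int) :
    (q.zip q.tail).foldl (fun t ab => t + |ab.1 - ab.2|) s = s + esum q := by
  induction q generalizing s with
  | nil => simp [esum_nil]
  | cons a q ih =>
    cases q with
    | nil => simp [esum_single]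
    | cons b t =>
      simp only [List.tail_cons, List.zip_cons_cons, List.foldl_cons] at ih ⊢
      rw [ih, esum_cons₂]; ring

theorem rangefold (q : List Int) (s : Int) :
    (List.range (q.length - 1)).foldl
      (fun acc i => acc + |q.getD i 0 - q.getD (i + 1) 0|) s = s + esum q := by
  induction q generalizing s with
  | nil => simp [esum_nil]
  | cons a q ih =>
    cases q with
    | nil => simp [esum_single]
    | cons b t =>
      have hlen : (a :: b :: t).length - 1 = t.length + 1 := by simp
      rw [hlen, List.range_succ_eq_map, List.foldl_cons, List.foldl_map]
      have h2 : (List.range t.length).foldl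
            (fun acc i => acc + |(a :: b :: t).getD (Nat.succ i) 0 - (a :: b :: t).getD (Nat.succ i + 1) 0|)
            (s + |(a :: b :: t).getD 0 0 - (a :: b :: t).getD (0 + 1) 0|)
          = (List.range t.length).foldl
            (fun acc i => acc + |(b :: t).getD i 0 - (b :: t).getD (i + 1) 0|)
            (s + |a - b|) := by
        apply PySem.List.foldl_congr_mem
        intro acc x _
        simp [List.getD]
      rw [h2]
      have := ih (s + |a - b|)
      simp only [List.length_cons, Nat.add_sub_cancel] at this
      rw [this, esum_cons₂]
      ring

theorem bDist_eq (q : List Int) : bDist q = q.getD 0 0 + esum q := by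
  unfold bDist; exact zipfold q _

theorem esum_append_cons (u : List Int) (x : Int) (r : List Int) :
    esum (u ++ x :: r) = esum u + glue u x + esum (x :: r) := by
  induction u with
  | nil => simp [glue_nil, esum]
  | cons a u ih =>
    cases u with
    | nil => simp [esum_single, esum_cons₂, glue]
    | cons b u' =>
      have h1 : (a :: b :: u') ++ x :: r = a :: b :: (u' ++ x :: r) := by simp
      rw [h1, esum_cons₂]
      have h2 : b :: (u' ++ x :: r) = (b :: u') ++ x :: r := by simp
      rw [h2, ih, esum_cons₂]
      have hg : glue (a :: b :: u') x = glue (b :: u') x := by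
        unfold glue
        rw [List.getLast?_cons_cons]
      rw [hg]; ring

theorem getD_append_len (u v : List Int) (z : Int) : (u ++ z :: v).getD u.length 0 = z := by
  rw [List.getD_eq_getElem?_getD, List.getElem?_append_right (le_refl u.length)]
  simp

theorem getD_append_add (u v : List Int) (k : Nat) : (u ++ v).getD (u.length + k) 0 = v.getD k 0 := by
  rw [List.getD_eq_getElem?_getD, List.getElem?_append_right (by omega)]
  simp [List.getD_eq_getElem?_getD]

theorem glue_ne_nil (u : List Int) (z : Int) (h : u ≠ []) : glue u z = |u.getLast h - z| := by
  unfold glue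
  rw [List.getLast?_eq_some_getLast h]

theorem swap_decomp (a b c : List Int) (x y : Int) :
    swapB (a ++ x :: (b ++ y :: c)) a.length (a.length + 1 + b.length) = a ++ y :: (b ++ x :: c) := by
  unfold swapB
  have hx : (a ++ x :: (b ++ y :: c)).getD a.length 0 = x := getD_append_len a (b ++ y :: c) x
  have hy : (a ++ x :: (b ++ y :: c)).getD (a.length + 1 + b.length) 0 = y := by
    have h0 : a ++ x :: (b ++ y :: c) = (a ++ x :: b) ++ y :: c := by simp
    have hl : a.length + 1 + b.length = (a ++ x :: b).length := by simp; omega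
    rw [h0, hl]
    exact getD_append_len _ c y
  rw [hx, hy, List.set_append, if_neg (by omega)]
  have h1 : (x :: (b ++ y :: c)).set (a.length - a.length) y = y :: (b ++ y :: c) := by
    simp
  rw [h1, List.set_append, if_neg (by omega)]
  have h2 : (y :: (b ++ y :: c)).set (a.length + 1 + b.length - a.length) x = y :: (b ++ x :: c) := by
    have h3 : a.length + 1 + b.length - a.length = b.length + 1 := by omega
    rw [h3, List.set_cons_succ, List.set_append, if_neg (by omega)]
    simp
  rw [h2]

def currOf (p : List Int) (i j : Nat) : Int :=
  let c0 := get_dist p i (p.getD i 0) + get_dist p j (p.getD j 0)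
  if ((i : Int) - (j : Int)).natAbs = 1 then c0 - |p.getD i 0 - p.getD j 0| else c0

def newOf (p : List Int) (i j : Nat) : Int :=
  let n0 := get_dist p i (p.getD j 0) + get_dist p j (p.getD i 0)
  if ((i : Int) - (j : Int)).natAbs = 1 then n0 + |p.getD i 0 - p.getD j 0| else n0

theorem getElem_cons_append (z : Int) (u w : List Int) (h : u.length < (z :: (u ++ w)).length) :
    (z :: (u ++ w))[u.length] = (z :: u)[u.length]'(by simp) := by
  have h0 : z :: (u ++ w) = (z :: u) ++ w := rfl
  rw [List.getElem_of_eq h0, List.getElem_append_left (by simp)]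

theorem glue_cons_getD (z : Int) (l : List Int) (v : Int) :
    glue (z :: l) v = |(z :: l).getD l.length 0 - v| := by
  rw [glue_ne_nil _ _ (List.cons_ne_nil z l)]
  rw [List.getLast_eq_getElem]
  rw [List.getD_eq_getElem?_getD]
  simp
  rfl

theorem key (a b c : List Int) (x y : Int) :
    ((a ++ x :: (b ++ y :: c)).getD 0 0 + esum (a ++ x :: (b ++ y :: c)))
      - currOf (a ++ x :: (b ++ y :: c)) a.length (a.length + 1 + b.length)
      + newOf (a ++ x :: (b ++ y :: c)) a.length (a.length + 1 + b.length)
    = bDist (swapB (a ++ x :: (b ++ y :: c)) a.length (a.length + 1 + b.length)) := by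
  rw [swap_decomp, bDist_eq]
  have eorig : esum (a ++ x :: (b ++ y :: c))
      = esum a + glue a x + esum (x :: b) + glue (x :: b) y + esum (y :: c) := by
    rw [esum_append_cons]
    have h0 : x :: (b ++ y :: c) = (x :: b) ++ y :: c := by simp
    rw [h0, esum_append_cons]
    ring
  have eswap : esum (a ++ y :: (b ++ x :: c))
      = esum a + glue a y + esum (y :: b) + glue (y :: b) x + esum (x :: c) := by
    rw [esum_append_cons]
    have h0 : y :: (b ++ x :: c) = (y :: b) ++ x :: c := by simp
    rw [h0, esum_append_cons]
    ring
  rw [eorig, eswap]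
  have hx : (a ++ x :: (b ++ y :: c)).getD a.length 0 = x := getD_append_len a _ x
  have hy : (a ++ x :: (b ++ y :: c)).getD (a.length + 1 + b.length) 0 = y := by
    have h0 : a ++ x :: (b ++ y :: c) = (a ++ x :: b) ++ y :: c := by simp
    have hl : a.length + 1 + b.length = (a ++ x :: b).length := by simp; omega
    rw [h0, hl]; exact getD_append_len _ c y
  have hA1 : (a ++ x :: (b ++ y :: c)).getD (a.length + 1) 0 = (b ++ y :: c).getD 0 0 := by
    have := getD_append_add a (x :: (b ++ y :: c)) 1
    simpa [List.getD] using this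
  have hA3 : (a ++ x :: (b ++ y :: c)).getD (a.length + 1 + b.length - 1) 0
      = (x :: b).getD b.length 0 := by
    have h0 : a ++ x :: (b ++ y :: c) = a ++ ((x :: b) ++ y :: c) := by simp
    have h1 : a.length + 1 + b.length - 1 = a.length + b.length := by omega
    rw [h0, h1, getD_append_add a ((x :: b) ++ y :: c) b.length,
        List.getD_eq_getElem?_getD, List.getElem?_append_left (by simp),
        ← List.getD_eq_getElem?_getD]
  have hA4 : (a ++ x :: (b ++ y :: c)).getD (a.length + 1 + b.length + 1) 0
      = c.getD 0 0 := by
    have h0 : a ++ x :: (b ++ y :: c) = (a ++ x :: (b ++ [y])) ++ c := by simp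
    have h1 : a.length + 1 + b.length + 1 = (a ++ x :: (b ++ [y])).length := by simp; omega
    rw [h0, h1, ← Nat.add_zero (a ++ x :: (b ++ [y])).length, getD_append_add]
  unfold currOf newOf get_dist
  rw [hx, hy, hA1, hA3, hA4]
  simp only [glue_cons_getD]
  have hc3 : ((a.length : Nat) : Int) < ((a ++ x :: (b ++ y :: c)).length : Int) - 1 := by
    simp [List.length_append]; push_cast; omega
  rw [if_pos hc3, if_pos hc3]
  rcases a with _ | ⟨a0, at'⟩
  · rcases b with _ | ⟨hb, bt⟩
    · rcases c with _ | ⟨hc, ct⟩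
      · simp [glue_cons_getD, glue_nil, esum, List.getD, getElem_cons_append]
        try split_ifs <;> try omega
        all_goals simp [abs_sub_comm, List.getD, getElem_cons_append]
        all_goals try ring
      · simp [glue_cons_getD, glue_nil, esum, List.getD, getElem_cons_append]
        try split_ifs <;> try omega
        all_goals simp [abs_sub_comm, List.getD, getElem_cons_append]
        all_goals try ring
    · rcases c with _ | ⟨hc, ct⟩
      · simp [glue_cons_getD, glue_nil, esum, List.getD, getElem_cons_append]
        try split_ifs <;> try omega
        all_goals simp [abs_sub_comm, List.getD, getElem_cons_append]
        all_goals try ring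
      · simp [glue_cons_getD, glue_nil, esum, List.getD, getElem_cons_append]
        try split_ifs <;> try omega
        all_goals simp [abs_sub_comm, List.getD, getElem_cons_append]
        all_goals try ring
  · rcases b with _ | ⟨hb, bt⟩
    · rcases c with _ | ⟨hc, ct⟩
      · simp [glue_cons_getD, glue_nil, esum, List.getD, getElem_cons_append]
        try split_ifs <;> try omega
        all_goals simp [abs_sub_comm, List.getD, getElem_cons_append]
        all_goals try ring
      · simp [glue_cons_getD, glue_nil, esum, List.getD, getElem_cons_append]
        try split_ifs <;> try omega
        all_goals simp [abs_sub_comm, List.getD, getElem_cons_append]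
        all_goals try ring
    · rcases c with _ | ⟨hc, ct⟩
      · simp [glue_cons_getD, glue_nil, esum, List.getD, getElem_cons_append]
        try split_ifs <;> try omega
        all_goals simp [abs_sub_comm, List.getD, getElem_cons_append]
        all_goals try ring
      · simp [glue_cons_getD, glue_nil, esum, List.getD, getElem_cons_append]
        try split_ifs <;> try omega
        all_goals simp [abs_sub_comm, List.getD, getElem_cons_append]
        all_goals try ring

theorem decomp (p : List Int) (i j : Nat) (hij : i < j) (hj : j < p.length) :
    ∃ a x b y c, p = a ++ x :: (b ++ y :: c) ∧ a.length = i ∧ a.length + 1 + b.length = j := by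
  refine ⟨p.take i, p[i]'(by omega), (p.drop (i + 1)).take (j - i - 1), p[j]'hj,
    p.drop (j + 1), ?_, ?_, ?_⟩
  · have h2 : p.drop i = p[i]'(by omega) :: p.drop (i + 1) := List.drop_eq_getElem_cons (by omega)
    have h3 : p.drop (i + 1)
        = (p.drop (i + 1)).take (j - i - 1) ++ (p.drop (i + 1)).drop (j - i - 1) :=
      (List.take_append_drop _ _).symm
    have h4 : (p.drop (i + 1)).drop (j - i - 1) = p.drop j := by
      rw [List.drop_drop]; congr 1; omega
    have h5 : p.drop j = p[j]'hj :: p.drop (j + 1) := List.drop_eq_getElem_cons hj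
    conv_lhs => rw [← List.take_append_drop i p, h2, h3, h4, h5]
  · simp [List.length_take]; omega
  · simp [List.length_take, List.length_drop]; omega

theorem solve_eq (p : List Int) : solve p = solve_alt p := by
  simp only [solve, solve_alt, rangefold]
  rw [bDist_eq]
  apply PySem.List.foldl_congr_mem
  intro best i hi
  apply PySem.List.foldl_congr_mem
  intro acc j hj
  have hi' : i < p.length - 1 := List.mem_range.mp hi
  have hj' : i + 1 ≤ j ∧ j < i + 1 + (p.length - (i + 1)) := List.mem_range'_1.mp hj
  have hjlen : j < p.length := by omega
  have hij : i < j := by omega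
  obtain ⟨a, x, b, y, c, hp, hi0, hj0⟩ := decomp p i j hij hjlen
  subst hi0
  subst hj0
  subst hp
  congr 1
  exact key a b c x y

-- ===== VERDICT (by name: the statement is the Claim_ definition above) =====
theorem solve_spec : Claim_equal_solve := by
  intro p _ _
  unfold Spec_solve
  exact solve_eq p
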